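-- pv_equiv track=rewrite | github.com/Uks130322/yandex_algs_6.0 | algs_6_2/task_H.py | move_on
-- ===== SOURCE A (Python) =====
-- def move_on(quantity: int, spaces: list[int]) -> int:
--     prefix_sum_left = [0] * quantity
--
--     summa = 0
--     for index in range(quantity):
--         if index > 0:
--             prefix_sum_left[index] = prefix_sum_left[index - 1] + summa
--         summa += spaces[index]
--
--     prefix_sum_right = [0] * quantity
--
--     summa = 0
--     for index in range(quantity - 1, -1, -1):
--         if index < quantity - 1:
--             prefix_sum_right[index] = prefix_sum_right[index + 1] + summa
--         summa += spaces[index]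
--
--     min_sum = prefix_sum_left[-1] + prefix_sum_right[-1]
--     for i in range(quantity):
--         move_sum = prefix_sum_left[i] + prefix_sum_right[i]
--         min_sum = min(move_sum, min_sum)
--
--     return min_sum
-- ===== SOURCE B (Python) =====
-- def move_on(quantity: int, spaces: list[int]) -> int:
--     # One incremental sweep: cost of position 0, then O(1) updates per position.
--     current = 0
--     total = 0
--     for i in range(quantity):
--         current += i * spaces[i]
--         total += spaces[i]
--     costs = []
--     left = 0
--     for p in range(quantity):
--         if p > 0:
--             left += spaces[p - 1]
--             current += left - (total - left)
--         costs.append(current)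
--     return min(costs)
-- ===== Notes on version B (the rewrite author's own statement) =====
-- stated objective: alternative
-- what changed: Replaces A's two prefix-sum tables plus a separate min-scan by a single incremental sweep that carries the current cost and the left weight, updating the cost in O(1) per position and taking the minimum of the cost list.
import Mathlib
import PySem

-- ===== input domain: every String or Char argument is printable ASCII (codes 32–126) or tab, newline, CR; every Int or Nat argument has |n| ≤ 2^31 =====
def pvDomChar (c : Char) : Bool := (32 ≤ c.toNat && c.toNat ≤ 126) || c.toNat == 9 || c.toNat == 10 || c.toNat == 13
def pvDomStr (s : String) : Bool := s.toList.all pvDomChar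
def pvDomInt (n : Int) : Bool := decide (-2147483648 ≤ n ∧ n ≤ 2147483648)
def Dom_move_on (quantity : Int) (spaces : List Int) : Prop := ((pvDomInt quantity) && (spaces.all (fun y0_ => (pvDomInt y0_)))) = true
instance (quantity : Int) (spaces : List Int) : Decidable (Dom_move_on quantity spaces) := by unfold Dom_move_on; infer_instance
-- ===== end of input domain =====

-- B replaces A's two prefix-sum tables + separate min-scan by one incremental sweep over the
-- positions; equivalence is about the return value, neither program mutates its arguments.

-- ===== PORT A =====
-- first loop: builds prefix_sum_left, state = (prefix_sum_left, summa)
def pvStepL (spaces : List Int) (st : List Int × Int) (index : Int) : List Int × Int :=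
  let psl := if index > 0
    then PySem.List.pySetD st.1 index (PySem.List.pyGetD st.1 (index - 1) 0 + st.2)
    else st.1
  (psl, st.2 + PySem.List.pyGetD spaces index 0)

-- second loop: builds prefix_sum_right, state = (prefix_sum_right, summa)
def pvStepR (quantity : Int) (spaces : List Int) (st : List Int × Int) (index : Int) : List Int × Int :=
  let psr := if index < quantity - 1
    then PySem.List.pySetD st.1 index (PySem.List.pyGetD st.1 (index + 1) 0 + st.2)
    else st.1
  (psr, st.2 + PySem.List.pyGetD spaces index 0)

def move_on (quantity : Int) (spaces : List Int) : Int :=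
  let psl := ((PySem.List.pyRange 0 quantity 1).foldl (pvStepL spaces)
               (List.replicate quantity.toNat 0, 0)).1
  let psr := ((PySem.List.pyRange (quantity - 1) (-1) (-1)).foldl (pvStepR quantity spaces)
               (List.replicate quantity.toNat 0, 0)).1
  let min_sum := PySem.List.pyGetD psl (-1) 0 + PySem.List.pyGetD psr (-1) 0
  (PySem.List.pyRange 0 quantity 1).foldl
    (fun min_sum i => min (PySem.List.pyGetD psl i 0 + PySem.List.pyGetD psr i 0) min_sum) min_sum

-- ===== PORT B =====
-- first loop of B: state = (current, total)
def pvAltStep1 (spaces : List Int) (st : Int × Int) (i : Int) : Int × Int :=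
  (st.1 + i * PySem.List.pyGetD spaces i 0, st.2 + PySem.List.pyGetD spaces i 0)

-- second loop of B: state = (costs, current, left)
def pvAltStep2 (total : Int) (spaces : List Int) (st : List Int × Int × Int) (p : Int) : List Int × Int × Int :=
  let cl : Int × Int :=
    if p > 0 then
      let left := st.2.2 + PySem.List.pyGetD spaces (p - 1) 0
      (st.2.1 + (left - (total - left)), left)
    else (st.2.1, st.2.2)
  (st.1 ++ [cl.1], cl.1, cl.2)

def move_on_alt (quantity : Int) (spaces : List Int) : Int :=
  let ct := (PySem.List.pyRange 0 quantity 1).foldl (pvAltStep1 spaces) (0, 0)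
  let costs := ((PySem.List.pyRange 0 quantity 1).foldl (pvAltStep2 ct.2 spaces) ([], ct.1, 0)).1
  (PySem.List.min? costs (fun y => y)).getD 0

-- ===== PRECONDITION & SPEC =====
-- A raises IndexError when quantity < 1 (last element of an empty table) or when quantity
-- exceeds len(spaces) (spaces[index]); exactly those inputs are excluded.
def Pre_move_on (quantity : Int) (spaces : List Int) : Prop :=
  1 ≤ quantity ∧ quantity ≤ (spaces.length : Int)
instance (quantity : Int) (spaces : List Int) : Decidable (Pre_move_on quantity spaces) := by
  unfold Pre_move_on; infer_instance
def pvWitness_move_on : Int × List Int := (3, [1, 2, 3])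

def Spec_move_on (quantity : Int) (spaces : List Int) (out : Int) : Prop := out = move_on_alt quantity spaces
instance (quantity : Int) (spaces : List Int) (out : Int) : Decidable (Spec_move_on quantity spaces out) := by unfold Spec_move_on; infer_instance

-- ===== CLAIM (what is proved, stated in full; the proofs are below) =====
def Claim_equal_move_on : Prop := ∀ (quantity : Int) (spaces : List Int), Dom_move_on quantity spaces → Pre_move_on quantity spaces → Spec_move_on quantity spaces (move_on quantity spaces)

-- ===== LEMMAS AND PROOFS =====

-- running sums and the recurrences A's tables / B's sweep satisfy
def pvS (spaces : List Int) : Nat → Int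
  | 0 => 0
  | m + 1 => pvS spaces m + spaces.getD m 0

def pvL (spaces : List Int) : Nat → Int
  | 0 => 0
  | m + 1 => pvL spaces m + pvS spaces (m + 1)

def pvRaux (n : Nat) (spaces : List Int) : Nat → Int
  | 0 => 0
  | j + 1 => pvRaux n spaces j + (pvS spaces n - pvS spaces (n - 1 - j))

def pvR (n : Nat) (spaces : List Int) (m : Nat) : Int := pvRaux n spaces (n - 1 - m)

def pvF (n : Nat) (spaces : List Int) (m : Nat) : Int := pvL spaces m + pvR n spaces m

lemma pv_getD_map_range (g : Nat → Int) (n j : Nat) (hj : j < n) :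
    ((List.range n).map g).getD j 0 = g j := by
  rw [List.getD_eq_getElem?_getD]
  simp [List.getElem?_map, List.getElem?_range, hj]

lemma pv_set_threshold_up (L : Nat → Int) (n m : Nat) (hm : m < n) :
    ((List.range n).map (fun j => if j < m then L j else 0)).set m (L m)
    = (List.range n).map (fun j => if j < m + 1 then L j else 0) := by
  apply List.ext_getElem
  · simp
  · intro i h1 h2
    simp only [List.getElem_set, List.getElem_map, List.getElem_range]
    simp only [List.length_set, List.length_map, List.length_range] at h1
    rcases eq_or_ne m i with rfl | hne
    · simp
    · simp only [hne, if_false]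
      have : i < m ↔ i < m + 1 := by omega
      simp [this]

lemma pv_set_threshold_down (Rf : Nat → Int) (n t : Nat) (ht : t < n) :
    ((List.range n).map (fun j => if t + 1 ≤ j then Rf j else 0)).set t (Rf t)
    = (List.range n).map (fun j => if t ≤ j then Rf j else 0) := by
  apply List.ext_getElem
  · simp
  · intro i h1 h2
    simp only [List.getElem_set, List.getElem_map, List.getElem_range]
    simp only [List.length_set, List.length_map, List.length_range] at h1
    rcases eq_or_ne t i with rfl | hne
    · simp
    · simp only [hne, if_false]
      have : t + 1 ≤ i ↔ t ≤ i := by omega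
      simp [this]

-- A, first loop
lemma pvA1 (spaces : List Int) (n : Nat) (m : Nat) (hm : m ≤ n) :
    ((List.range m).map (fun k => Int.ofNat k)).foldl (pvStepL spaces) (List.replicate n 0, 0)
    = ((List.range n).map (fun j => if j < m then pvL spaces j else 0), pvS spaces m) := by
  induction m with
  | zero =>
      simp [pvS, List.map_const']
  | succ k ih =>
      simp only [List.range_succ, List.map_append, List.foldl_append]
      rw [ih (by omega)]
      simp only [List.map_cons, List.map_nil, List.foldl_cons, List.foldl_nil]
      cases k with
      | zero =>
          simp only [pvStepL, Int.ofNat_zero, gt_iff_lt, lt_self_iff_false, if_false]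
          simp only [Prod.mk.injEq]
          constructor
          · apply List.map_congr_left
            intro a _
            have h0 : (a < 0) = False := by simp
            rcases Nat.eq_zero_or_pos a with rfl | ha
            · simp [pvL]
            · have : ¬ a < 1 := by omega
              simp [this]
          · simp [pvS, PySem.List.pyGetD_zero]
      | succ k' =>
          simp only [pvStepL]
          have hpos : Int.ofNat (k' + 1) > 0 := by simp only [Int.ofNat_eq_natCast]; omega
          simp only [hpos, if_true]
          have hidx : Int.ofNat (k' + 1) - 1 = Int.ofNat k' := by simp only [Int.ofNat_eq_natCast]; push_cast; ring
          rw [hidx]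
          simp only [Int.ofNat_eq_natCast, PySem.List.pyGetD_natCast, PySem.List.pySetD_natCast]
          rw [pv_getD_map_range _ n k' (by omega)]
          have hk' : k' < k' + 1 := by omega
          simp only [hk', if_true]
          have hLv : pvL spaces k' + pvS spaces (k' + 1) = pvL spaces (k' + 1) := by
            simp [pvL]
          rw [hLv, pv_set_threshold_up (pvL spaces) n (k' + 1) (by omega)]
          simp only [Prod.mk.injEq]
          refine ⟨trivial, ?_⟩
          simp [pvS]

-- A, second loop (runs over the indices n-1, n-2, …, 0)
lemma pvA2 (spaces : List Int) (n : Nat) (hn : 1 ≤ n) (m : Nat) (hm : m ≤ n) :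
    ((List.range m).map (fun k => (n : Int) - 1 - Int.ofNat k)).foldl (pvStepR (n : Int) spaces)
        (List.replicate n 0, 0)
    = ((List.range n).map (fun j => if n - m ≤ j then pvR n spaces j else 0),
       pvS spaces n - pvS spaces (n - m)) := by
  induction m with
  | zero =>
      have : ∀ a ∈ List.range n, (if n - 0 ≤ a then pvR n spaces a else 0) = (0 : Int) := by
        intro a ha
        have hna : ¬ n - 0 ≤ a := by simp at ha; omega
        rw [if_neg hna]
      rw [List.map_congr_left this]
      simp [List.map_const']
  | succ k ih =>
      simp only [List.range_succ, List.map_append, List.foldl_append]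
      rw [ih (by omega)]
      simp only [List.map_cons, List.map_nil, List.foldl_cons, List.foldl_nil]
      have hidx : (n : Int) - 1 - Int.ofNat k = Int.ofNat (n - 1 - k) := by
        simp only [Int.ofNat_eq_natCast]; omega
      rw [hidx]
      cases k with
      | zero =>
          have hc : ¬ (Int.ofNat (n - 1 - 0) < (n : Int) - 1) := by
            simp only [Int.ofNat_eq_natCast]; omega
          simp only [pvStepR, hc, if_false]
          simp only [Prod.mk.injEq]
          constructor
          · apply List.map_congr_left
            intro a ha
            simp only [List.mem_range] at ha
            rcases eq_or_ne a (n - 1) with rfl | hne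
            · have h1 : ¬ n - 0 ≤ n - 1 := by omega
              have h2 : n - 1 ≤ n - 1 := le_refl _
              have hR : pvR n spaces (n - 1) = 0 := by
                simp [pvR, Nat.sub_self, pvRaux]
              simp [h1, h2, hR]
            · have h1 : ¬ (n - 0 ≤ a) := by omega
              have h2 : ¬ (n - (0 + 1) ≤ a) := by omega
              rw [if_neg h1, if_neg h2]
          · simp only [Int.ofNat_eq_natCast, PySem.List.pyGetD_natCast]
            have e1 : n - (0 + 1) = n - 1 := by omega
            have e2 : n - 1 - 0 = n - 1 := by omega
            have e3 : n - 0 = n := by omega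
            have e4 : n - (1 + 0) = n - 1 := by omega
            simp only [Int.ofNat_eq_natCast, e1, e2, e3, e4]
            have hSn : pvS spaces n = pvS spaces (n - 1) + spaces.getD (n - 1) 0 := by
              have : n = (n - 1) + 1 := by omega
              rw [this]; simp [pvS]
            omega
      | succ k' =>
          have hc : Int.ofNat (n - 1 - (k' + 1)) < (n : Int) - 1 := by
            simp only [Int.ofNat_eq_natCast]; omega
          simp only [pvStepR, hc, if_true]
          have hidx2 : Int.ofNat (n - 1 - (k' + 1)) + 1 = Int.ofNat (n - (k' + 1)) := by
            simp only [Int.ofNat_eq_natCast]; omega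
          rw [hidx2]
          simp only [Int.ofNat_eq_natCast, PySem.List.pyGetD_natCast, PySem.List.pySetD_natCast]
          rw [pv_getD_map_range _ n (n - (k' + 1)) (by omega)]
          have ht : n - (k' + 1) ≤ n - (k' + 1) := le_refl _
          simp only [ht, if_true]
          have hval : pvR n spaces (n - (k' + 1)) + (pvS spaces n - pvS spaces (n - (k' + 1)))
              = pvR n spaces (n - 1 - (k' + 1)) := by
            have e1 : n - 1 - (n - (k' + 1)) = k' := by omega
            have e2 : n - 1 - (n - 1 - (k' + 1)) = k' + 1 := by omega
            have e3 : n - 1 - k' = n - (k' + 1) := by omega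
            simp only [pvR, e1, e2, pvRaux, e3]
          rw [hval]
          have hset : ((List.range n).map
                (fun j => if n - (k' + 1) ≤ j then pvR n spaces j else 0)).set (n - 1 - (k' + 1))
                (pvR n spaces (n - 1 - (k' + 1)))
              = (List.range n).map (fun j => if n - (k' + 2) ≤ j then pvR n spaces j else 0) := by
            have e4 : n - (k' + 1) = (n - 1 - (k' + 1)) + 1 := by omega
            have e5 : n - (k' + 2) = n - 1 - (k' + 1) := by omega
            rw [e4, e5]
            exact pv_set_threshold_down (pvR n spaces) n (n - 1 - (k' + 1)) (by omega)
          rw [hset]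
          simp only [Prod.mk.injEq]
          refine ⟨trivial, ?_⟩
          have hSstep : pvS spaces (n - (k' + 1)) = pvS spaces (n - (k' + 2)) + spaces.getD (n - (k' + 2)) 0 := by
            have : n - (k' + 1) = (n - (k' + 2)) + 1 := by omega
            rw [this]; simp [pvS]
          have hg : spaces.getD (n - 1 - (k' + 1)) 0 = spaces.getD (n - (k' + 2)) 0 := by
            congr 1; omega
          have e6 : n - (k' + 1 + 1) = n - (k' + 2) := by omega
          simp only [hg, e6]
          omega

-- B, first loop
lemma pvB1 (spaces : List Int) (m : Nat) :
    ((List.range m).map (fun k => Int.ofNat k)).foldl (pvAltStep1 spaces) (0, 0)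
    = (∑ i ∈ Finset.range m, (i : Int) * spaces.getD i 0, pvS spaces m) := by
  induction m with
  | zero => simp [pvS]
  | succ k ih =>
      simp only [List.range_succ, List.map_append, List.foldl_append]
      rw [ih]
      simp only [List.map_cons, List.map_nil, List.foldl_cons, List.foldl_nil, pvAltStep1,
        Int.ofNat_eq_natCast, PySem.List.pyGetD_natCast]
      rw [Finset.sum_range_succ]
      simp [pvS]

lemma pv_pvRaux_sum (n : Nat) (spaces : List Int) (j : Nat) :
    pvRaux n spaces j = ∑ m ∈ Finset.range j, (pvS spaces n - pvS spaces (n - 1 - m)) := by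
  induction j with
  | zero => simp [pvRaux]
  | succ k ih => rw [Finset.sum_range_succ, ← ih]; simp [pvRaux]

lemma pv_sumT (spaces : List Int) (N : Nat) :
    ∑ m ∈ Finset.range N, (pvS spaces (N + 1) - pvS spaces (m + 1))
    = ∑ i ∈ Finset.range (N + 1), (i : Int) * spaces.getD i 0 := by
  induction N with
  | zero => simp
  | succ k ih =>
      rw [Finset.sum_range_succ]
      have hstep : ∀ m : Nat, pvS spaces (k + 2) - pvS spaces (m + 1)
          = (pvS spaces (k + 1) - pvS spaces (m + 1)) + spaces.getD (k + 1) 0 := by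
        intro m
        have : pvS spaces (k + 2) = pvS spaces (k + 1) + spaces.getD (k + 1) 0 := by
          simp [pvS]
        omega
      calc ∑ m ∈ Finset.range k, (pvS spaces (k + 1 + 1) - pvS spaces (m + 1))
            + (pvS spaces (k + 1 + 1) - pvS spaces (k + 1))
          = (∑ m ∈ Finset.range k, (pvS spaces (k + 1) - pvS spaces (m + 1))
              + (k : Int) * spaces.getD (k + 1) 0) + spaces.getD (k + 1) 0 := by
            have h1 : ∑ m ∈ Finset.range k, (pvS spaces (k + 1 + 1) - pvS spaces (m + 1))
                = ∑ m ∈ Finset.range k,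
                    ((pvS spaces (k + 1) - pvS spaces (m + 1)) + spaces.getD (k + 1) 0) := by
              apply Finset.sum_congr rfl
              intro m _
              exact hstep m
            rw [h1, Finset.sum_add_distrib, Finset.sum_const, Finset.card_range]
            have h2 : pvS spaces (k + 1 + 1) - pvS spaces (k + 1) = spaces.getD (k + 1) 0 := by
              simp [pvS]
            rw [h2]
            push_cast
            ring
        _ = ∑ i ∈ Finset.range (k + 1 + 1), (i : Int) * spaces.getD i 0 := by
            rw [ih, Finset.sum_range_succ (n := k + 1)]
            push_cast
            ring

-- B's starting cost is the cost of position 0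
lemma pvF0 (n : Nat) (spaces : List Int) (hn : 1 ≤ n) :
    pvF n spaces 0 = ∑ i ∈ Finset.range n, (i : Int) * spaces.getD i 0 := by
  have h0 : pvF n spaces 0 = pvRaux n spaces (n - 1) := by
    simp [pvF, pvL, pvR]
  rw [h0, pv_pvRaux_sum]
  have hrefl := Finset.sum_range_reflect (fun j => pvS spaces n - pvS spaces (j + 1)) (n - 1)
  have hcongr : ∑ m ∈ Finset.range (n - 1), (pvS spaces n - pvS spaces (n - 1 - m))
      = ∑ j ∈ Finset.range (n - 1), (pvS spaces n - pvS spaces (n - 1 - 1 - j + 1)) := by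
    apply Finset.sum_congr rfl
    intro m hm
    simp only [Finset.mem_range] at hm
    have : n - 1 - m = n - 1 - 1 - m + 1 := by omega
    rw [this]
  rw [hcongr, hrefl]
  have hn' : n = (n - 1) + 1 := by omega
  rw [hn']
  exact pv_sumT spaces (n - 1)

-- cost recurrence used by B's sweep
lemma pvF_succ (n : Nat) (spaces : List Int) (m : Nat) (hm : m < n - 1) :
    pvF n spaces (m + 1)
    = pvF n spaces m + (pvS spaces (m + 1) - (pvS spaces n - pvS spaces (m + 1))) := by
  have hL : pvL spaces (m + 1) = pvL spaces m + pvS spaces (m + 1) := by simp [pvL]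
  have e1 : n - 1 - m = (n - 2 - m) + 1 := by omega
  have e2 : n - 1 - (n - 2 - m) = m + 1 := by omega
  have e3 : n - 1 - (m + 1) = n - 2 - m := by omega
  have hR : pvR n spaces m = pvR n spaces (m + 1) + (pvS spaces n - pvS spaces (m + 1)) := by
    simp only [pvR, e1, e3, pvRaux, e2]
  simp only [pvF, hL, hR]
  ring

-- B, second loop
lemma pvB2 (n : Nat) (spaces : List Int) (hn : 1 ≤ n) (m : Nat) (hm : m ≤ n) :
    ((List.range m).map (fun k => Int.ofNat k)).foldl (pvAltStep2 (pvS spaces n) spaces)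
        ([], pvF n spaces 0, 0)
    = ((List.range m).map (pvF n spaces), pvF n spaces (m - 1), pvS spaces (m - 1)) := by
  induction m with
  | zero => simp [pvS]
  | succ k ih =>
      simp only [List.range_succ, List.map_append, List.foldl_append]
      rw [ih (by omega)]
      simp only [List.map_cons, List.map_nil, List.foldl_cons, List.foldl_nil, pvAltStep2]
      cases k with
      | zero =>
          have hc : ¬ (Int.ofNat 0 > 0) := by simp [Int.ofNat_eq_natCast]
          simp [hc, pvS]
      | succ k' =>
          have hc : Int.ofNat (k' + 1) > 0 := by simp only [Int.ofNat_eq_natCast]; omega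
          simp only [hc, if_true]
          have hidx : Int.ofNat (k' + 1) - 1 = Int.ofNat k' := by
            simp only [Int.ofNat_eq_natCast]; push_cast; ring
          rw [hidx]
          simp only [Int.ofNat_eq_natCast, PySem.List.pyGetD_natCast]
          have e1 : k' + 1 - 1 = k' := by omega
          simp only [e1]
          have hleft : pvS spaces k' + spaces.getD k' 0 = pvS spaces (k' + 1) := by simp [pvS]
          have hcur : pvF n spaces k'
                + (pvS spaces k' + spaces.getD k' 0 - (pvS spaces n - (pvS spaces k' + spaces.getD k' 0)))
              = pvF n spaces (k' + 1) := by
            rw [hleft, pvF_succ n spaces k' (by omega)]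
          simp only [Prod.mk.injEq]
          exact ⟨by rw [hcur], hcur, hleft⟩

-- both results are the minimum of the same cost list
lemma pv_costs_cons (f : Nat → Int) (n : Nat) (hn : 1 ≤ n) :
    (List.range n).map f = f 0 :: (List.range (n - 1)).map (fun k => f (k + 1)) := by
  have hn' : n = (n - 1) + 1 := by omega
  rw [hn', List.range_succ_eq_map, List.map_cons, List.map_map]
  rfl

lemma pv_minfold (f : Nat → Int) (n : Nat) (hn : 1 ≤ n) :
    ((List.range n).map f).foldl min (f (n - 1))
    = ((List.range (n - 1)).map (fun k => f (k + 1))).foldl min (f 0) := by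
  have hC := pv_costs_cons f n hn
  set C' := (List.range (n - 1)).map (fun k => f (k + 1)) with hC'
  apply le_antisymm
  · have hmem : ((List.range n).map f).foldl min (f (n - 1)) ≤ f 0 ∧
        ∀ y ∈ C', ((List.range n).map f).foldl min (f (n - 1)) ≤ y := by
      have hle := (PySem.List.foldl_min_le ((List.range n).map f) (f (n - 1))).2
      constructor
      · exact hle _ (by rw [hC]; exact List.mem_cons_self)
      · intro y hy
        exact hle y (by rw [hC]; exact List.mem_cons_of_mem _ hy)
    rcases PySem.List.foldl_min_mem C' (f 0) with h | h
    · rw [h]; exact hmem.1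
    · exact hmem.2 _ h
  · have hle := PySem.List.foldl_min_le C' (f 0)
    rw [hC]
    rcases PySem.List.foldl_min_mem (f 0 :: C') (f (n - 1)) with h | h
    · rw [h]
      have hmem : f (n - 1) ∈ f 0 :: C' := by
        rw [← hC]
        apply List.mem_map_of_mem
        simp only [List.mem_range]
        omega
      rcases List.mem_cons.mp hmem with h2 | h2
      · rw [h2]; exact hle.1
      · exact hle.2 _ h2
    · rcases List.mem_cons.mp h with h2 | h2
      · rw [h2]; exact hle.1
      · exact hle.2 _ h2

-- ===== VERDICT (by name: the statement is the Claim_ definition above) =====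
theorem move_on_spec : Claim_equal_move_on := by
  intro q spaces _ hpre
  obtain ⟨h1, h2⟩ := hpre
  obtain ⟨n, rfl⟩ : ∃ n : Nat, q = (n : Int) :=
    ⟨q.toNat, (Int.toNat_of_nonneg (by omega)).symm⟩
  have hn1 : 1 ≤ n := by exact_mod_cast h1
  unfold Spec_move_on move_on move_on_alt
  -- normalise the three ranges
  rw [PySem.List.pyRange_zero_natCast n]
  have hr2 : PySem.List.pyRange ((n : Int) - 1) (-1) (-1)
      = (List.range n).map (fun k : Nat => (n : Int) - 1 - (k : Int)) := by
    rw [PySem.List.pyRange_neg_one]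
    have : ((n : Int) - 1 - (-1)).toNat = n := by omega
    rw [this]
  rw [hr2]
  -- A's two table-building loops
  have hA1 := pvA1 spaces n n le_rfl
  have hA2 := pvA2 spaces n hn1 n le_rfl
  simp only [Int.ofNat_eq_natCast] at hA1 hA2
  have htoNat : ((n : Int)).toNat = n := by omega
  rw [htoNat, hA1, hA2]
  -- the finished tables list the costs pvL, pvR
  have epsl : (List.range n).map (fun j => if j < n then pvL spaces j else 0)
      = (List.range n).map (pvL spaces) := by
    apply List.map_congr_left
    intro a ha
    simp only [List.mem_range] at ha
    simp [ha]
  have epsr : (List.range n).map (fun j => if n - n ≤ j then pvR n spaces j else 0)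
      = (List.range n).map (pvR n spaces) := by
    apply List.map_congr_left
    intro a _
    simp
  rw [epsl, epsr]
  dsimp only
  -- initial min_sum of A: the cost of the last position
  have hne : (List.range n).map (pvL spaces) ≠ [] := by
    simp; omega
  have hne' : (List.range n).map (pvR n spaces) ≠ [] := by
    simp; omega
  rw [PySem.List.pyGetD_neg_one _ _ hne, PySem.List.pyGetD_neg_one _ _ hne']
  have hlast1 : ((List.range n).map (pvL spaces)).getLast hne = pvL spaces (n - 1) := by
    rw [List.getLast_eq_getElem]
    simp only [List.getElem_map, List.getElem_range, List.length_map, List.length_range]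
  have hlast2 : ((List.range n).map (pvR n spaces)).getLast hne' = pvR n spaces (n - 1) := by
    rw [List.getLast_eq_getElem]
    simp only [List.getElem_map, List.getElem_range, List.length_map, List.length_range]
  rw [hlast1, hlast2]
  have hR0 : pvR n spaces (n - 1) = 0 := by
    have : n - 1 - (n - 1) = 0 := by omega
    simp [pvR, this, pvRaux]
  rw [hR0, add_zero]
  -- A's minimum scan is a min-fold over the cost list
  rw [List.foldl_map]
  have hbody : List.foldl
        (fun min_sum k => min (PySem.List.pyGetD ((List.range n).map (pvL spaces)) ((k : Nat) : Int) 0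
          + PySem.List.pyGetD ((List.range n).map (pvR n spaces)) ((k : Nat) : Int) 0) min_sum)
        (pvL spaces (n - 1)) (List.range n)
      = List.foldl (fun acc k => min acc (pvF n spaces k)) (pvL spaces (n - 1)) (List.range n) := by
    apply PySem.List.foldl_congr_mem
    intro acc k hk
    simp only [List.mem_range] at hk
    rw [PySem.List.pyGetD_natCast, PySem.List.pyGetD_natCast,
        pv_getD_map_range _ n k hk, pv_getD_map_range _ n k hk]
    rw [min_comm]
    rfl
  rw [hbody, ← List.foldl_map (f := fun k => pvF n spaces k) (g := fun (acc v : Int) => min acc v)]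
  -- B's first sweep
  have hB1 := pvB1 spaces n
  simp only [Int.ofNat_eq_natCast] at hB1
  rw [hB1]
  -- B's incremental sweep builds the same cost list
  have hB2 := pvB2 n spaces hn1 n le_rfl
  simp only [Int.ofNat_eq_natCast] at hB2
  have hc0 : (∑ i ∈ Finset.range n, (i : Int) * spaces.getD i 0) = pvF n spaces 0 :=
    (pvF0 n spaces hn1).symm
  simp only [hc0]
  rw [hB2]
  -- min of the cost list
  rw [pv_costs_cons (pvF n spaces) n hn1, PySem.List.min?_id_cons, Option.getD_some]
  -- both sides are the minimum of the same list of costs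
  have hinit : pvL spaces (n - 1) = pvF n spaces (n - 1) := by
    simp [pvF, hR0]
  rw [hinit, ← pv_costs_cons (pvF n spaces) n hn1]
  exact pv_minfold (pvF n spaces) n hn1
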